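-- pv_equiv track=rewrite | github.com/colincano20/Uiowa | 2024-25/1stSemester/ComputerScience1/Notes/PY notes/GPTpractice.py | findFirstVowelCluster
-- ===== SOURCE A (Python) =====
-- def findFirstVowelCluster(S):
--     vowels = 'aeiouAEIOU'  # Case-insensitive vowel checking
--     cluster = ''  # This will store the vowel cluster when found
--     for c in S:
--         if c in vowels:
--             cluster += c  # Add vowels to the cluster
--         elif cluster:  # If we've already started a cluster, break on first non-vowel
--             return cluster  # Return the cluster when it ends
--     return cluster  # If we find a cluster at the end, return it; otherwise, it's empty
-- ===== SOURCE B (Python) =====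
-- def findFirstVowelCluster(S):
--     vowels = 'aeiouAEIOU'
--     n = len(S)
--     i = 0
--     while i < n and S[i] not in vowels:
--         i += 1
--     j = i
--     while j < n and S[j] in vowels:
--         j += 1
--     return S[i:j]
-- ===== Notes on version B (the rewrite author's own statement) =====
-- stated objective: alternative
-- what changed: Replaces A's accumulator-with-early-return loop by a two-index scan (advance i past non-vowels, then j over the vowel run) returning the single slice S[i:j].
import Mathlib
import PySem

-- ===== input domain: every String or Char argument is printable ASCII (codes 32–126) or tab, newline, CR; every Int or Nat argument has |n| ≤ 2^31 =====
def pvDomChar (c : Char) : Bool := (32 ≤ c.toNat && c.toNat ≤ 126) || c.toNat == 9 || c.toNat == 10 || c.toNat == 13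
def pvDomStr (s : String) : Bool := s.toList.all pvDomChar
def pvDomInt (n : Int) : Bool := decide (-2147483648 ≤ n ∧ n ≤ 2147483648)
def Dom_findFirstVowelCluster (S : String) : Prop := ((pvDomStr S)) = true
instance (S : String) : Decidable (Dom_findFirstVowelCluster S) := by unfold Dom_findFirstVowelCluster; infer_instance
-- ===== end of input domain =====

-- B replaces A's accumulate-and-break loop by a two-index scan (skip non-vowels, advance over the vowel run) returning one slice S[i:j].

-- ===== PORT A =====
-- `c in vowels` for the literal vowel string
def pvIsVowel (c : Char) : Bool := "aeiouAEIOU".toList.contains c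

-- A's for-loop with accumulator `cluster` and early return; the string cluster is
-- carried as its List Char (built left-to-right, as Python's `cluster += c`).
def aLoop : List Char → List Char → List Char
  | [], cluster => cluster
  | c :: cs, cluster =>
    if pvIsVowel c then aLoop cs (cluster ++ [c])
    else if cluster ≠ [] then cluster
    else aLoop cs cluster

def findFirstVowelCluster (S : String) : String := String.ofList (aLoop S.toList [])

-- ===== PORT B =====
-- first while loop of Source B: `while i < n and S[i] not in vowels: i += 1`,
-- transliterated as structural recursion over the suffix being examined, carrying i
def bW1 : List Char → Nat → Nat
  | [], i => i
  | c :: cs, i => if pvIsVowel c then i else bW1 cs (i + 1)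

-- second while loop of Source B: `while j < n and S[j] in vowels: j += 1`
def bW2 : List Char → Nat → Nat
  | [], j => j
  | c :: cs, j => if pvIsVowel c then bW2 cs (j + 1) else j

def findFirstVowelCluster_alt (S : String) : String :=
  let l := S.toList
  let i := bW1 l 0
  let j := bW2 (l.drop i) i
  String.ofList (PySem.List.slice l (some (i : Int)) (some (j : Int)))  -- S[i:j]

-- ===== PRECONDITION & SPEC =====
def Spec_findFirstVowelCluster (S : String) (out : String) : Prop := out = findFirstVowelCluster_alt S
instance (S : String) (out : String) : Decidable (Spec_findFirstVowelCluster S out) := by unfold Spec_findFirstVowelCluster; infer_instance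

-- ===== CLAIM (what is proved, stated in full; the proofs are below) =====
def Claim_equal_findFirstVowelCluster : Prop := ∀ (S : String), Dom_findFirstVowelCluster S → Spec_findFirstVowelCluster S (findFirstVowelCluster S)

-- ===== LEMMAS AND PROOFS =====

-- proof-only abstractions: leading-non-vowel drop and leading-vowel take
def bDrop : List Char → List Char
  | [] => []
  | c :: cs => if pvIsVowel c then c :: cs else bDrop cs

def bTake : List Char → List Char
  | [] => []
  | c :: cs => if pvIsVowel c then c :: bTake cs else []

-- length of the leading non-vowel prefix
def nvLen : List Char → Nat
  | [] => 0
  | c :: cs => if pvIsVowel c then 0 else nvLen cs + 1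

theorem bW1_eq (l : List Char) : ∀ i, bW1 l i = i + nvLen l := by
  induction l with
  | nil => intro i; simp [bW1, nvLen]
  | cons c cs ih =>
    intro i
    by_cases hv : pvIsVowel c = true
    · simp [bW1, nvLen, hv]
    · simp [bW1, nvLen, hv, ih]; omega

theorem drop_nvLen (l : List Char) : l.drop (nvLen l) = bDrop l := by
  induction l with
  | nil => simp [nvLen, bDrop]
  | cons c cs ih =>
    by_cases hv : pvIsVowel c = true
    · simp [nvLen, bDrop, hv]
    · simp [nvLen, bDrop, hv, ih]

theorem bW2_eq (l : List Char) : ∀ j, bW2 l j = j + (bTake l).length := by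
  induction l with
  | nil => intro j; simp [bW2, bTake]
  | cons c cs ih =>
    intro j
    by_cases hv : pvIsVowel c = true
    · simp [bW2, bTake, hv, ih]; omega
    · simp [bW2, bTake, hv]

theorem take_bTake (l : List Char) : l.take (bTake l).length = bTake l := by
  induction l with
  | nil => simp [bTake]
  | cons c cs ih =>
    by_cases hv : pvIsVowel c = true
    · simp [bTake, hv, ih]
    · simp [bTake, hv]

-- once the cluster is nonempty, A's loop just extends it with the leading vowel run
theorem aLoop_nonempty (l : List Char) : ∀ (acc : List Char), acc ≠ [] →
    aLoop l acc = acc ++ bTake l := by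
  induction l with
  | nil => intro acc _; simp [aLoop, bTake]
  | cons c cs ih =>
    intro acc h
    by_cases hv : pvIsVowel c = true
    · have : (acc ++ [c]) ≠ [] := by simp
      simp [aLoop, bTake, hv, ih _ this]
    · simp [aLoop, bTake, hv, h]

-- from the empty cluster, A's loop is exactly take-after-drop
theorem aLoop_nil (l : List Char) : aLoop l [] = bTake (bDrop l) := by
  induction l with
  | nil => simp [aLoop, bDrop, bTake]
  | cons c cs ih =>
    by_cases hv : pvIsVowel c = true
    · have h1 : aLoop cs ([c]) = [c] ++ bTake cs := aLoop_nonempty cs [c] (by simp)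
      simp [aLoop, bDrop, bTake, hv, h1]
    · simp [aLoop, bDrop, hv, ih]

-- B's two-index scan plus slice computes take-after-drop as well
theorem alt_eq (S : String) :
    findFirstVowelCluster_alt S = String.ofList (bTake (bDrop S.toList)) := by
  unfold findFirstVowelCluster_alt
  set l := S.toList with hl
  have hi : bW1 l 0 = nvLen l := by simpa using bW1_eq l 0
  have hdrop : l.drop (bW1 l 0) = bDrop l := by rw [hi]; exact drop_nvLen l
  have hj : bW2 (l.drop (bW1 l 0)) (bW1 l 0) = bW1 l 0 + (bTake (bDrop l)).length := by
    rw [bW2_eq, hdrop]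
  simp only [hj]
  have hcast : (↑(bW1 l 0 + (bTake (bDrop l)).length) : Int)
      = (↑(bW1 l 0) : Int) + (↑((bTake (bDrop l)).length) : Int) := by push_cast; ring
  rw [hcast, PySem.List.slice_natCast_add, hdrop, take_bTake]

-- ===== VERDICT (by name: the statement is the Claim_ definition above) =====
theorem findFirstVowelCluster_spec : Claim_equal_findFirstVowelCluster := by
  intro S _
  unfold Spec_findFirstVowelCluster findFirstVowelCluster
  rw [aLoop_nil, alt_eq]
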